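-- pv_equiv track=rewrite | github.com/MatsuiLin101/alss-dev | src/apps/surveys22/builder/tokenizer.py | id_and_value
-- ===== SOURCE A (Python) =====
-- def id_and_value(string):
--     cnt = 0
--     index = 0
--     for i in range(0, len(string)):
--         if string[i] == "1":
--             index = i + 1
--             cnt = cnt + 1
--     return cnt, index
-- ===== SOURCE B (Python) =====
-- def id_and_value(string):
--     cnt = sum(ch == "1" for ch in string)
--     for i in range(len(string) - 1, -1, -1):
--         if string[i] == "1":
--             return cnt, i + 1
--     return cnt, 0
-- ===== Notes on version B (the rewrite author's own statement) =====
-- stated objective: idiomatic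
-- what changed: A's single forward indexed loop maintaining two accumulators is replaced by a generator-expression sum for the count plus a separate early-exit reverse scan that returns at the last '1'.
import Mathlib
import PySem

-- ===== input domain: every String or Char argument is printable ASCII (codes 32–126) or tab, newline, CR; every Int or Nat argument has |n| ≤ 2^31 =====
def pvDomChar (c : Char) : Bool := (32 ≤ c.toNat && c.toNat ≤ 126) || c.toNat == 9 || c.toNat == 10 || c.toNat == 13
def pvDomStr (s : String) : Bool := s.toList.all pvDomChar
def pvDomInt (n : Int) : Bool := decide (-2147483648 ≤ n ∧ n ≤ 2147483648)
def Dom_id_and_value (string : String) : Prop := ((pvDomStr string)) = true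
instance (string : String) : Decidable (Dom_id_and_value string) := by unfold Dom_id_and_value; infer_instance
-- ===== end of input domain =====

-- B replaces A's single forward indexed loop (two accumulators) by a generator-sum for the
-- count and a separate early-exit reverse scan for the index after the last '1' (idiomatic).

-- ===== PORT A =====
-- for i in range(0, len(string)): if string[i] == "1": index = i + 1; cnt = cnt + 1
def id_and_value (string : String) : Int × Int :=
  (PySem.List.pyRange 0 (PySem.Str.len string) 1).foldl
    (fun (st : Int × Int) i =>
      if PySem.Str.pyGet? string i = some '1' then (st.1 + 1, i + 1) else st)
    (0, 0)

-- ===== PORT B =====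
-- the reverse loop 'for i in range(len(string)-1, -1, -1): if string[i] == "1": return cnt, i+1'
-- as a structural recursion on the (Nat) loop counter, reading the same characters
def pvLastOne (cs : List Char) : Nat → Int
  | 0 => 0
  | i + 1 => if cs[i]? = some '1' then (i : Int) + 1 else pvLastOne cs i

def id_and_value_alt (string : String) : Int × Int :=
  ((string.toList.map (fun ch => if ch = '1' then (1 : Int) else 0)).sum,
   pvLastOne string.toList string.toList.length)

-- ===== PRECONDITION & SPEC =====
def Spec_id_and_value (string : String) (out : Int × Int) : Prop := out = id_and_value_alt string
instance (string : String) (out : Int × Int) : Decidable (Spec_id_and_value string out) := by unfold Spec_id_and_value; infer_instance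

-- ===== CLAIM (what is proved, stated in full; the proofs are below) =====
def Claim_equal_id_and_value : Prop := ∀ (string : String), Dom_id_and_value string → Spec_id_and_value string (id_and_value string)

-- ===== LEMMAS AND PROOFS =====

theorem pvLastOne_append (cs : List Char) (c : Char) :
    ∀ i, i ≤ cs.length → pvLastOne (cs ++ [c]) i = pvLastOne cs i := by
  intro i
  induction i with
  | zero => intro _; rfl
  | succ i ih =>
    intro h
    have hi : i < cs.length := by omega
    simp only [pvLastOne, List.getElem?_append_left hi, ih (by omega)]

theorem pv_key (cs : List Char) :
    (PySem.List.pyRange 0 (cs.length : Int) 1).foldl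
      (fun (st : Int × Int) i =>
        if PySem.List.pyGet? cs i = some '1' then (st.1 + 1, i + 1) else st)
      (0, 0)
    = ((cs.map (fun ch => if ch = '1' then (1 : Int) else 0)).sum,
       pvLastOne cs cs.length) := by
  induction cs using List.reverseRecOn with
  | nil => simp [PySem.List.pyRange_one_eq_nil, pvLastOne]
  | append_singleton cs c ih =>
    have hlen : ((cs ++ [c]).length : Int) = (cs.length : Int) + 1 := by
      simp
    rw [hlen, PySem.List.pyRange_one_succ_right (by positivity), List.foldl_append]
    have hcong :
        (PySem.List.pyRange 0 (cs.length : Int) 1).foldl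
          (fun (st : Int × Int) i =>
            if PySem.List.pyGet? (cs ++ [c]) i = some '1' then (st.1 + 1, i + 1) else st)
          (0, 0)
        = (PySem.List.pyRange 0 (cs.length : Int) 1).foldl
          (fun (st : Int × Int) i =>
            if PySem.List.pyGet? cs i = some '1' then (st.1 + 1, i + 1) else st)
          (0, 0) := by
      apply PySem.List.foldl_congr_mem
      intro acc x hx
      rcases PySem.List.mem_pyRange_one.mp hx with ⟨hx0, hxlt⟩
      have hx' : x = ((x.toNat : Nat) : Int) := by omega
      have hnat : x.toNat < cs.length := by omega
      rw [hx', PySem.List.pyGet?_natCast, PySem.List.pyGet?_natCast,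
        List.getElem?_append_left hnat]
    rw [hcong, ih]
    have hget : PySem.List.pyGet? (cs ++ [c]) (cs.length : Int) = some c :=
      PySem.List.pyGet?_append_length cs [] c
    have hlast : pvLastOne (cs ++ [c]) ((cs ++ [c]).length)
        = if c = '1' then (cs.length : Int) + 1 else pvLastOne cs cs.length := by
      have : (cs ++ [c]).length = cs.length + 1 := by simp
      rw [this]
      simp only [pvLastOne, List.getElem?_append_right (le_refl cs.length),
        Nat.sub_self, List.getElem?_cons_zero]
      by_cases hc : c = '1'
      · simp [hc]
      · simp [hc, pvLastOne_append cs c cs.length (le_refl _)]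
    simp only [List.foldl_cons, List.foldl_nil, hget, hlast, List.map_append,
      List.sum_append, List.map_cons, List.map_nil, List.sum_cons, List.sum_nil]
    by_cases hc : c = '1' <;> simp [hc]

-- ===== VERDICT (by name: the statement is the Claim_ definition above) =====
theorem id_and_value_spec : Claim_equal_id_and_value := by
  intro s _
  unfold Spec_id_and_value id_and_value id_and_value_alt
  have h1 : PySem.Str.len s = (s.toList.length : Int) := by
    simp [PySem.Str.len]
  have h2 : ∀ (st : Int × Int) (i : Int),
      (if PySem.Str.pyGet? s i = some '1' then (st.1 + 1, i + 1) else st)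
      = (if PySem.List.pyGet? s.toList i = some '1' then (st.1 + 1, i + 1) else st) := by
    intro st i
    simp [PySem.Str.pyGet?]
  rw [h1]
  calc (PySem.List.pyRange 0 (s.toList.length : Int) 1).foldl
        (fun (st : Int × Int) i =>
          if PySem.Str.pyGet? s i = some '1' then (st.1 + 1, i + 1) else st) (0, 0)
      = (PySem.List.pyRange 0 (s.toList.length : Int) 1).foldl
        (fun (st : Int × Int) i =>
          if PySem.List.pyGet? s.toList i = some '1' then (st.1 + 1, i + 1) else st) (0, 0) := by
        exact PySem.List.foldl_congr_mem _ _ _ _ (fun acc x _ => h2 acc x)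
    _ = _ := pv_key s.toList
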